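-- pv_equiv track=rewrite | github.com/CrispStrobe/meilisearch-stuff | search.py | extract_highlights
-- ===== SOURCE A (Python) =====
-- def extract_highlights(content, highlight_start_tag, highlight_end_tag, context_size):
--     """Extract content around highlighted terms"""
--     if not content or highlight_start_tag not in content:
--         return []
--
--     highlights = []
--     pos = 0
--
--     while True:
--         # Find next highlight
--         start_pos = content.find(highlight_start_tag, pos)
--         if start_pos == -1:
--             break
--
--         end_pos = content.find(highlight_end_tag, start_pos)
--         if end_pos == -1:
--             break
--
--         # Get context before and after the highlight
--         context_start = max(0, start_pos - context_size * 5)  # Approximate 5 chars per word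
--         context_end = min(len(content), end_pos + len(highlight_end_tag) + context_size * 5)
--
--         # Extract the context with highlight
--         context = content[context_start:context_end]
--
--         # Add ellipsis if needed
--         if context_start > 0:
--             context = "... " + context
--         if context_end < len(content):
--             context = context + " ..."
--
--         highlights.append(context)
--         pos = end_pos + len(highlight_end_tag)
--
--     return highlights
-- ===== SOURCE B (Python) =====
-- def _occurrences(content, tag):
--     """All (possibly overlapping) start indices of tag in content, ascending."""
--     if not tag:
--         return list(range(len(content) + 1))
--     out = []
--     i = content.find(tag)
--     while i != -1:
--         out.append(i)
--         i = content.find(tag, i + 1)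
--     return out
--
--
-- def extract_highlights(content, highlight_start_tag, highlight_end_tag, context_size):
--     """Extract content around highlighted terms"""
--     if not content or highlight_start_tag not in content:
--         return []
--
--     starts = _occurrences(content, highlight_start_tag)
--     ends = _occurrences(content, highlight_end_tag)
--     n = len(content)
--     pad = context_size * 5
--     tail = len(highlight_end_tag)
--
--     highlights = []
--     j = 0
--     pos = 0
--     for s in starts:
--         if s < pos:
--             continue
--         while j < len(ends) and ends[j] < s:
--             j += 1
--         if j == len(ends):
--             break
--         e = ends[j]
--         context_start = max(0, s - pad)
--         context_end = min(n, e + tail + pad)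
--         context = content[context_start:context_end]
--         if context_start > 0:
--             context = "... " + context
--         if context_end < n:
--             context = context + " ..."
--         highlights.append(context)
--         pos = e + tail
--     return highlights
-- ===== Notes on version B (the rewrite author's own statement) =====
-- stated objective: alternative
-- what changed: Replaces the repeated content.find re-scans of the while-loop with two precomputed ascending occurrence-index lists (start tags and end tags) merged by a single two-pointer pass; the end-tag pointer never moves backwards.
-- outside the precondition, e.g. on extract_highlights('a', 'a', '', 1): A does not finish within the time limit, B returns ['a']
import Mathlib
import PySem

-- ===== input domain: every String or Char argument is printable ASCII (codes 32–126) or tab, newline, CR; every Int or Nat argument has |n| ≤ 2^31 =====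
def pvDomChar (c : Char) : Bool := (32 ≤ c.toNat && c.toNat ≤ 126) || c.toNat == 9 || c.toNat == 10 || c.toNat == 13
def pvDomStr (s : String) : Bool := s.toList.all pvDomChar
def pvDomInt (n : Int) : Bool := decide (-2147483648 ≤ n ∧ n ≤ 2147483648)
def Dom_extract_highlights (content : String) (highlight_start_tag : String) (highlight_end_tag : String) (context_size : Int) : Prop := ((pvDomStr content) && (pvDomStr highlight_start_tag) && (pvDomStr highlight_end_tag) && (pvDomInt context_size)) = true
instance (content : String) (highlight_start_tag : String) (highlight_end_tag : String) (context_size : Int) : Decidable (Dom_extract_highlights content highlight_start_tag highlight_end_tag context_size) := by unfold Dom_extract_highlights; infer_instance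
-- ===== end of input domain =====

-- B replaces A's repeated content.find re-scans with two precomputed ascending occurrence-index
-- lists merged by a single two-pointer pass (objective: alternative algorithm, same results).

-- ===== PORT A =====
-- A's while-loop, fueled (inside Pre_ the loop position strictly increases, so
-- content.length + 2 units of fuel are never exhausted; the fuel only makes it total).
def pvLoopA (cs st en : List Char) (context_size : Int) : Nat → Nat → List (List Char)
  | 0, _ => []
  | fuel + 1, pos =>
    let start_pos := PySem.Chars.findFrom cs st (pos : Int) none
    if start_pos = -1 then []
    else
      let end_pos := PySem.Chars.findFrom cs en start_pos none
      if end_pos = -1 then []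
      else
        let context_start : Int := max 0 (start_pos - context_size * 5)
        let context_end : Int := min (cs.length : Int) (end_pos + (en.length : Int) + context_size * 5)
        let context := PySem.List.slice cs (some context_start) (some context_end)
        let context := if 0 < context_start then "... ".toList ++ context else context
        let context := if context_end < (cs.length : Int) then context ++ " ...".toList else context
        context :: pvLoopA cs st en context_size fuel (end_pos.toNat + en.length)

def extract_highlights (content : String) (highlight_start_tag : String) (highlight_end_tag : String) (context_size : Int) : List String :=
  let cs := content.toList
  if cs = [] ∨ PySem.Chars.isIn highlight_start_tag.toList cs = false then []
  else (pvLoopA cs highlight_start_tag.toList highlight_end_tag.toList context_size (cs.length + 2) 0).map String.ofList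

-- ===== PORT B =====
-- _occurrences: find-loop (fueled: a nonempty tag has at most cs.length occurrences)
def pvOccGo (cs tag : List Char) : Nat → Nat → List Nat
  | 0, _ => []
  | fuel + 1, i =>
    let j := PySem.Chars.findFrom cs tag (i : Int) none
    if j = -1 then [] else j.toNat :: pvOccGo cs tag fuel (j.toNat + 1)

def pvOccurrences (cs tag : List Char) : List Nat :=
  if tag = [] then List.range (cs.length + 1) else pvOccGo cs tag (cs.length + 1) 0

-- the inner `while j < len(ends) and ends[j] < s: j += 1`
def pvAdv (ends : List Nat) (s : Nat) (j : Nat) : Nat :=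
  if j < ends.length ∧ ends[j]! < s then pvAdv ends s (j + 1) else j
  termination_by ends.length - j
  decreasing_by omega

-- the snippet body of B's for-loop
def pvSnip (cs : List Char) (n : Nat) (pad : Int) (tail : Nat) (s e : Nat) : List Char :=
  let context_start : Int := max 0 ((s : Int) - pad)
  let context_end : Int := min (n : Int) ((e : Int) + (tail : Int) + pad)
  let context := PySem.List.slice cs (some context_start) (some context_end)
  let context := if 0 < context_start then "... ".toList ++ context else context
  if context_end < (n : Int) then context ++ " ...".toList else context

-- B's `for s in starts` loop, structural over the starts list, state (j, pos)
def pvGoB (cs en : List Char) (ends : List Nat) (context_size : Int) : List Nat → Nat → Nat → List (List Char)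
  | [], _, _ => []
  | s :: rest, j, pos =>
    if s < pos then pvGoB cs en ends context_size rest j pos
    else
      let j' := pvAdv ends s j
      if j' = ends.length then []
      else
        pvSnip cs cs.length (context_size * 5) en.length s (ends[j']!) ::
          pvGoB cs en ends context_size rest j' (ends[j']! + en.length)

def extract_highlights_alt (content : String) (highlight_start_tag : String) (highlight_end_tag : String) (context_size : Int) : List String :=
  let cs := content.toList
  if cs = [] ∨ PySem.Chars.isIn highlight_start_tag.toList cs = false then []
  else
    let starts := pvOccurrences cs highlight_start_tag.toList
    let ends := pvOccurrences cs highlight_end_tag.toList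
    (pvGoB cs highlight_end_tag.toList ends context_size starts 0 0).map String.ofList

-- ===== PRECONDITION & SPEC =====
-- Pre_ excludes exactly the inputs on which A never returns (it loops forever): nonempty
-- content containing the start tag while the end tag is empty, so `pos` never advances.
def Pre_extract_highlights (content : String) (highlight_start_tag : String) (highlight_end_tag : String) (context_size : Int) : Prop :=
  content.toList = [] ∨ PySem.Chars.isIn highlight_start_tag.toList content.toList = false ∨ highlight_end_tag.toList ≠ []
instance (content : String) (highlight_start_tag : String) (highlight_end_tag : String) (context_size : Int) : Decidable (Pre_extract_highlights content highlight_start_tag highlight_end_tag context_size) := by unfold Pre_extract_highlights; infer_instance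

def pvWitness_extract_highlights : String × String × String × Int := ("hello <em>world</em> again", "<em>", "</em>", 1)

def Spec_extract_highlights (content : String) (highlight_start_tag : String) (highlight_end_tag : String) (context_size : Int) (out : List String) : Prop := out = extract_highlights_alt content highlight_start_tag highlight_end_tag context_size
instance (content : String) (highlight_start_tag : String) (highlight_end_tag : String) (context_size : Int) (out : List String) : Decidable (Spec_extract_highlights content highlight_start_tag highlight_end_tag context_size out) := by unfold Spec_extract_highlights; infer_instance

-- ===== CLAIM (what is proved, stated in full; the proofs are below) =====
def Claim_equal_extract_highlights : Prop := ∀ (content : String) (highlight_start_tag : String) (highlight_end_tag : String) (context_size : Int), Dom_extract_highlights content highlight_start_tag highlight_end_tag context_size → Pre_extract_highlights content highlight_start_tag highlight_end_tag context_size → Spec_extract_highlights content highlight_start_tag highlight_end_tag context_size (extract_highlights content highlight_start_tag highlight_end_tag context_size)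

-- ===== LEMMAS AND PROOFS =====

-- an occurrence at q ≥ p makes the tag an infix of cs.drop p
lemma pv_infix_of_occ (cs tag : List Char) (p q : Nat) (hpq : p ≤ q) (hq : tag <+: cs.drop q) :
    tag <:+: cs.drop p := by
  rw [← PySem.Chars.isIn_iff_infix, ← PySem.Chars.exists_prefix_drop_iff_isIn]
  exact ⟨q - p, by rwa [List.drop_drop, Nat.add_sub_cancel' hpq]⟩

-- a nonempty prefix of cs.drop q forces q < cs.length
lemma pv_occ_lt_len (cs tag : List Char) (q : Nat) (htag : tag ≠ []) (hq : tag <+: cs.drop q) :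
    q < cs.length := by
  have h1 := hq.length_le
  rw [List.length_drop] at h1
  have h2 : 0 < tag.length := List.length_pos_iff.mpr htag
  omega

lemma pvOccGo_mem (cs tag : List Char) (htag : tag ≠ []) :
    ∀ (fuel i : Nat), i ≤ cs.length → cs.length + 1 ≤ fuel + i →
      ∀ q : Nat, q ∈ pvOccGo cs tag fuel i ↔ (i ≤ q ∧ tag <+: cs.drop q) := by
  intro fuel
  induction fuel with
  | zero => intro i hi hfuel; omega
  | succ f ih =>
    intro i hi hfuel q
    rw [pvOccGo]
    by_cases hj : PySem.Chars.findFrom cs tag (i : Int) none = -1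
    · rw [hj, if_pos rfl]
      simp only [List.not_mem_nil, false_iff, not_and]
      intro hiq hq
      have : tag <:+: cs.drop i := pv_infix_of_occ cs tag i q hiq hq
      rw [PySem.Chars.findFrom_natCast_eq_neg_one_iff cs tag i hi] at hj
      exact hj this
    · obtain ⟨h1, h2, h3⟩ := PySem.Chars.findFrom_natCast_spec cs tag i hi hj
      set j := PySem.Chars.findFrom cs tag (i : Int) none with hjdef
      have hj0 : (0 : Int) ≤ j := le_trans (by positivity) h1
      have hij : i ≤ j.toNat := by omega
      have hjlen : j.toNat < cs.length := pv_occ_lt_len cs tag j.toNat htag h2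
      rw [if_neg hj, List.mem_cons, ih (j.toNat + 1) (by omega) (by omega) q]
      constructor
      · rintro (rfl | ⟨hq1, hq2⟩)
        · exact ⟨hij, h2⟩
        · exact ⟨by omega, hq2⟩
      · rintro ⟨hq1, hq2⟩
        by_cases hqj : q = j.toNat
        · exact Or.inl hqj
        · right
          refine ⟨?_, hq2⟩
          by_contra hlt
          exact h3 q hq1 (by omega) hq2

lemma pvOccGo_sorted (cs tag : List Char) (htag : tag ≠ []) :
    ∀ (fuel i : Nat), i ≤ cs.length → cs.length + 1 ≤ fuel + i →
      (pvOccGo cs tag fuel i).Pairwise (· < ·) := by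
  intro fuel
  induction fuel with
  | zero => intro i _ _; exact List.Pairwise.nil
  | succ f ih =>
    intro i hi hfuel
    rw [pvOccGo]
    by_cases hj : PySem.Chars.findFrom cs tag (i : Int) none = -1
    · simp [hj]
    · obtain ⟨h1, h2, h3⟩ := PySem.Chars.findFrom_natCast_spec cs tag i hi hj
      set j := PySem.Chars.findFrom cs tag (i : Int) none with hjdef
      have hjlen : j.toNat < cs.length := pv_occ_lt_len cs tag j.toNat htag h2
      rw [if_neg hj]
      refine List.Pairwise.cons ?_ (ih (j.toNat + 1) (by omega) (by omega))
      intro q hq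
      have := (pvOccGo_mem cs tag htag f (j.toNat + 1) (by omega) (by omega) q).mp hq
      omega

lemma pvOcc_mem (cs tag : List Char) (q : Nat) :
    q ∈ pvOccurrences cs tag ↔ (q ≤ cs.length ∧ tag <+: cs.drop q) := by
  rw [pvOccurrences]
  by_cases htag : tag = []
  · subst htag
    simp [List.mem_range, List.nil_prefix]
  · rw [if_neg htag, pvOccGo_mem cs tag htag (cs.length + 1) 0 (by omega) (by omega) q]
    constructor
    · rintro ⟨-, hq⟩
      exact ⟨le_of_lt (pv_occ_lt_len cs tag q htag hq), hq⟩
    · rintro ⟨-, hq⟩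
      exact ⟨Nat.zero_le q, hq⟩

lemma pvOcc_sorted (cs tag : List Char) : (pvOccurrences cs tag).Pairwise (· < ·) := by
  rw [pvOccurrences]
  by_cases htag : tag = []
  · rw [if_pos htag]; exact List.pairwise_lt_range
  · rw [if_neg htag]; exact pvOccGo_sorted cs tag htag (cs.length + 1) 0 (by omega) (by omega)

-- findFrom characterisations in terms of an explicit minimal occurrence
lemma pv_find_eq (cs tag : List Char) (p q : Nat) (hp : p ≤ cs.length)
    (hq : tag <+: cs.drop q) (hpq : p ≤ q)
    (hmin : ∀ r, p ≤ r → r < q → ¬ tag <+: cs.drop r) :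
    PySem.Chars.findFrom cs tag (p : Int) none = (q : Int) := by
  have hne : PySem.Chars.findFrom cs tag (p : Int) none ≠ -1 := by
    rw [ne_eq, PySem.Chars.findFrom_natCast_eq_neg_one_iff cs tag p hp]
    exact not_not_intro (pv_infix_of_occ cs tag p q hpq hq)
  obtain ⟨h1, h2, h3⟩ := PySem.Chars.findFrom_natCast_spec cs tag p hp hne
  set f := PySem.Chars.findFrom cs tag (p : Int) none with hf
  have hf0 : (0 : Int) ≤ f := le_trans (by positivity) h1
  have hple : p ≤ f.toNat := by omega
  have hqf : f.toNat = q := by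
    rcases lt_trichotomy f.toNat q with h | h | h
    · exact absurd h2 (hmin f.toNat hple h)
    · exact h
    · exact absurd hq (h3 q hpq h)
  omega

lemma pv_find_neg (cs tag : List Char) (p : Nat) (hp : p ≤ cs.length)
    (hnone : ∀ r, p ≤ r → ¬ tag <+: cs.drop r) :
    PySem.Chars.findFrom cs tag (p : Int) none = -1 := by
  rw [PySem.Chars.findFrom_natCast_eq_neg_one_iff cs tag p hp]
  rw [← PySem.Chars.isIn_iff_infix, ← PySem.Chars.exists_prefix_drop_iff_isIn]
  rintro ⟨d, hd⟩
  rw [List.drop_drop] at hd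
  exact hnone (p + d) (by omega) hd

-- specification of the inner while loop of B
lemma pvAdv_spec (ends : List Nat) (s j : Nat) (hj : j ≤ ends.length) :
    j ≤ pvAdv ends s j ∧ pvAdv ends s j ≤ ends.length ∧
      (∀ k, j ≤ k → k < pvAdv ends s j → ∀ hk : k < ends.length, ends[k] < s) ∧
      (∀ h : pvAdv ends s j < ends.length, s ≤ ends[pvAdv ends s j]) := by
  fun_induction pvAdv ends s j with
  | case1 j hcond ih =>
    obtain ⟨ih1, ih2, ih3, ih4⟩ := ih (by omega)
    refine ⟨by omega, ih2, ?_, ih4⟩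
    intro k hk1 hk2 hk
    rcases eq_or_lt_of_le hk1 with h | h
    · subst h; rw [getElem!_pos ends j hk] at hcond; exact hcond.2
    · exact ih3 k (by omega) hk2 hk
  | case2 j hcond =>
    refine ⟨le_refl _, hj, by omega, ?_⟩
    intro h
    rw [not_and_or] at hcond
    rcases hcond with h' | h'
    · omega
    · rw [getElem!_pos ends j h] at h'; omega

-- main simulation: A's while-loop equals B's two-pointer pass
lemma pvLoop_eq (cs st en : List Char) (csz : Int) (hen : en ≠ []) :
    ∀ (sl : List Nat) (fuel j pos : Nat),
      (∀ q ∈ sl, q ∈ pvOccurrences cs st) →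
      sl.Pairwise (· < ·) →
      (∀ q ∈ pvOccurrences cs st, pos ≤ q → q ∈ sl) →
      j ≤ (pvOccurrences cs en).length →
      (∀ k, k < j → ∀ hk : k < (pvOccurrences cs en).length, (pvOccurrences cs en)[k] < pos) →
      pos ≤ cs.length →
      cs.length + 1 ≤ fuel + pos →
      pvLoopA cs st en csz fuel pos = pvGoB cs en (pvOccurrences cs en) csz sl j pos := by
  have hL : 0 < en.length := List.length_pos_iff.mpr hen
  intro sl
  induction sl with
  | nil =>
    intro fuel j pos hmem hsort hcomp hjlen hjlt hpos hfuel
    obtain ⟨f, rfl⟩ : ∃ f, fuel = f + 1 := ⟨fuel - 1, by omega⟩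
    have hsp : PySem.Chars.findFrom cs st (pos : Int) none = -1 := by
      refine pv_find_neg cs st pos hpos ?_
      intro r hr hmatch
      by_cases hrlen : r ≤ cs.length
      · have hocc : r ∈ pvOccurrences cs st := (pvOcc_mem cs st r).mpr ⟨hrlen, hmatch⟩
        exact absurd (hcomp r hocc hr) (List.not_mem_nil)
      · have hst : st = [] := by
          have hd : cs.drop r = [] := List.drop_eq_nil_of_le (by omega)
          rw [hd] at hmatch
          exact List.prefix_nil.mp hmatch
        have hm : pos ∈ pvOccurrences cs st :=
          (pvOcc_mem cs st pos).mpr ⟨hpos, by rw [hst]; exact List.nil_prefix⟩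
        exact absurd (hcomp pos hm (le_refl pos)) (List.not_mem_nil)
    simp [pvLoopA, pvGoB, hsp]
  | cons s rest ih =>
    intro fuel j pos hmem hsort hcomp hjlen hjlt hpos hfuel
    by_cases hs : s < pos
    · rw [pvGoB, if_pos hs]
      refine ih fuel j pos (fun q hq => hmem q (List.mem_cons_of_mem s hq)) hsort.of_cons
        ?_ hjlen hjlt hpos hfuel
      intro q hq hq2
      rcases List.mem_cons.mp (hcomp q hq hq2) with rfl | h
      · omega
      · exact h
    · push Not at hs
      have hsOcc := hmem s List.mem_cons_self
      obtain ⟨hslen, hsmatch⟩ := (pvOcc_mem cs st s).mp hsOcc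
      obtain ⟨f, rfl⟩ : ∃ f, fuel = f + 1 := ⟨fuel - 1, by omega⟩
      have hsp : PySem.Chars.findFrom cs st (pos : Int) none = (s : Int) := by
        refine pv_find_eq cs st pos s hpos hsmatch hs ?_
        intro r hr1 hr2 hmatch
        have hrocc : r ∈ pvOccurrences cs st := (pvOcc_mem cs st r).mpr ⟨by omega, hmatch⟩
        rcases List.mem_cons.mp (hcomp r hrocc hr1) with rfl | h
        · omega
        · have := List.rel_of_pairwise_cons hsort h
          omega
      obtain ⟨ha1, ha2, ha3, ha4⟩ := pvAdv_spec (pvOccurrences cs en) s j hjlen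
      by_cases hj' : pvAdv (pvOccurrences cs en) s j = (pvOccurrences cs en).length
      · have hep : PySem.Chars.findFrom cs en (s : Int) none = -1 := by
          refine pv_find_neg cs en s hslen ?_
          intro r hr hmatch
          have hrlen := pv_occ_lt_len cs en r hen hmatch
          have hrocc : r ∈ pvOccurrences cs en := (pvOcc_mem cs en r).mpr ⟨by omega, hmatch⟩
          obtain ⟨k, hk, hkr⟩ := List.mem_iff_getElem.mp hrocc
          by_cases hkj : k < j
          · have := hjlt k hkj hk; omega
          · have := ha3 k (by omega) (by omega) hk; omega
        simp [pvLoopA, pvGoB, hsp, hep, if_neg (not_lt.mpr hs), hj',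
          show ¬((s : Int) = -1) by omega]
      · have hj'len : (pvAdv (pvOccurrences cs en) s j) < (pvOccurrences cs en).length := by omega
        have hgetbang : (pvOccurrences cs en)[pvAdv (pvOccurrences cs en) s j]! =
            (pvOccurrences cs en)[pvAdv (pvOccurrences cs en) s j]'hj'len :=
          getElem!_pos (pvOccurrences cs en) (pvAdv (pvOccurrences cs en) s j) hj'len
        set e := (pvOccurrences cs en)[pvAdv (pvOccurrences cs en) s j]'hj'len with hedef
        have heOcc : e ∈ pvOccurrences cs en := List.getElem_mem hj'len
        obtain ⟨helen, hematch⟩ := (pvOcc_mem cs en e).mp heOcc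
        have hse : s ≤ e := ha4 hj'len
        have hLe : e + en.length ≤ cs.length := by
          have h1 := hematch.length_le
          rw [List.length_drop] at h1
          omega
        have hep : PySem.Chars.findFrom cs en (s : Int) none = (e : Int) := by
          refine pv_find_eq cs en s e hslen hematch hse ?_
          intro r hr1 hr2 hmatch
          have hrocc : r ∈ pvOccurrences cs en := (pvOcc_mem cs en r).mpr ⟨by omega, hmatch⟩
          obtain ⟨k, hk, hkr⟩ := List.mem_iff_getElem.mp hrocc
          have hkj' : k < pvAdv (pvOccurrences cs en) s j := by
            by_contra hge
            push Not at hge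
            rcases eq_or_lt_of_le hge with heq | hlt
            · have her : e = r := by
                rw [hedef]
                simp only [heq]
                exact hkr
              omega
            · have := (List.pairwise_iff_getElem.mp (pvOcc_sorted cs en)) _ k hj'len hk hlt
              omega
          by_cases hkj : k < j
          · have := hjlt k hkj hk; omega
          · have := ha3 k (by omega) hkj' hk; omega
        have hrec := ih f (pvAdv (pvOccurrences cs en) s j) (e + en.length)
          (fun q hq => hmem q (List.mem_cons_of_mem s hq)) hsort.of_cons
          (by
            intro q hq hq2
            rcases List.mem_cons.mp (hcomp q hq (by omega)) with rfl | h
            · omega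
            · exact h)
          ha2
          (by
            intro k hk hk2
            by_cases hkj : k < j
            · have := hjlt k hkj hk2; omega
            · have := ha3 k (by omega) hk hk2; omega)
          hLe (by omega)
        simp only [pvLoopA, pvGoB, hsp, hep, if_neg (not_lt.mpr hs), if_neg hj',
          if_neg (show ¬((s : Int) = -1) by omega), if_neg (show ¬((e : Int) = -1) by omega),
          hgetbang, Int.toNat_natCast]
        rw [hrec]
        simp [pvSnip]

-- ===== VERDICT (by name: the statement is the Claim_ definition above) =====
theorem extract_highlights_spec : Claim_equal_extract_highlights := by
  intro content st en csz _hdom hpre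
  unfold Spec_extract_highlights extract_highlights extract_highlights_alt
  by_cases hg : content.toList = [] ∨ PySem.Chars.isIn st.toList content.toList = false
  · simp only [hg, if_true]
  · have hen : en.toList ≠ [] := by
      rcases hpre with h | h | h
      · exact absurd (Or.inl h) hg
      · exact absurd (Or.inr h) hg
      · exact h
    simp only [if_neg hg]
    exact congrArg (List.map String.ofList)
      (pvLoop_eq content.toList st.toList en.toList csz hen
        (pvOccurrences content.toList st.toList) (content.toList.length + 2) 0 0
        (fun q h => h) (pvOcc_sorted content.toList st.toList) (fun q h _ => h)
        (Nat.zero_le _) (fun k hk _ => absurd hk (by omega)) (Nat.zero_le _) (by omega))
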